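-- pv_equiv track=rewrite | github.com/juyeonma/python-coding-test-study | Programmers/0608/[PGS]전화번호 목록.py | solution
-- ===== SOURCE A (Python) =====
-- def solution(phone_book):
--     answer = True
--     for i in range(len(phone_book)):
--         for j in range(len(phone_book)):
--             if i == j:
--                 continue
--             else:
--                 if phone_book[j].count(phone_book[i]) > 0:
--                     answer = False
--             if not answer:
--                 break
--     return answer
-- ===== SOURCE B (Python) =====
-- def solution(phone_book):
--     # Different algorithm: index the book's strings with multiplicities once,
--     # then for each number enumerate all of its substrings (slices) and look
--     # them up; a slice equal to the whole number needs multiplicity >= 2.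
--     count = {}
--     for p in phone_book:
--         count[p] = count.get(p, 0) + 1
--     for q in phone_book:
--         n = len(q)
--         for a in range(n + 1):
--             for b in range(a, n + 1):
--                 t = q[a:b]
--                 if count.get(t, 0) > (1 if t == q else 0):
--                     return False
--     return True
-- ===== Notes on version B (the rewrite author's own statement) =====
-- stated objective: alternative
-- what changed: Replaces the all-pairs .count scan with a one-pass multiplicity dictionary of the book followed by, for each number, enumerating its own substrings and looking them up (threshold 2 for the substring equal to the whole number), with early return on the first hit.
import Mathlib
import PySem

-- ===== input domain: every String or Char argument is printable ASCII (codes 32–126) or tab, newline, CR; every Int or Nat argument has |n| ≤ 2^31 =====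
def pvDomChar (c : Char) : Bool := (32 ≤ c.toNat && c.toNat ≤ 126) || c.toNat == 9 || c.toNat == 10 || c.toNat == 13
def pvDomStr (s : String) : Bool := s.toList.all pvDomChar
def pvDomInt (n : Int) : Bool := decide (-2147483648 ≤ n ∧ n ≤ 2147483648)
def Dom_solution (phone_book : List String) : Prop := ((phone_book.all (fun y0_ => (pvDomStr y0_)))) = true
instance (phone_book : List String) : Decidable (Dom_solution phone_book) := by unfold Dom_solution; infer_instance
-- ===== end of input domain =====

-- B replaces A's all-pairs `.count` scan by a multiplicity dictionary of the book plus,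
-- for each number, an enumeration of its own substrings looked up in that dictionary
-- (alternative algorithm, same return value).

-- ===== PORT A =====
-- inner `for j in range(len(phone_book))` loop, with `continue` and `break`
def solnInner (phone_book : List String) (i : Int) : Bool → List Int → Bool
  | answer, [] => answer
  | answer, j :: js =>
    if i = j then solnInner phone_book i answer js
    else
      let answer' := if PySem.Str.count (PySem.List.pyGetD phone_book j "")
                        (PySem.List.pyGetD phone_book i "") > 0 then false else answer
      if answer' = false then answer' else solnInner phone_book i answer' js

def solution (phone_book : List String) : Bool :=
  (PySem.List.pyRange 0 phone_book.length 1).foldl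
    (fun answer i => solnInner phone_book i answer (PySem.List.pyRange 0 phone_book.length 1)) true

-- ===== PORT B =====
def solution_alt (phone_book : List String) : Bool :=
  let count : PySem.Dict String Int :=
    phone_book.foldl (fun d p => d.insert p (d.getD p 0 + 1)) PySem.Dict.empty
  ! phone_book.any (fun q =>
      (PySem.List.pyRange 0 (PySem.Str.len q + 1) 1).any (fun a =>
        (PySem.List.pyRange a (PySem.Str.len q + 1) 1).any (fun b =>
          let t := PySem.Str.slice q (some a) (some b)
          count.getD t 0 > (if t == q then (1 : Int) else 0))))

-- ===== PRECONDITION & SPEC =====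
def Spec_solution (phone_book : List String) (out : Bool) : Prop := out = solution_alt phone_book
instance (phone_book : List String) (out : Bool) : Decidable (Spec_solution phone_book out) := by unfold Spec_solution; infer_instance

-- ===== CLAIM (what is proved, stated in full; the proofs are below) =====
def Claim_equal_solution : Prop := ∀ (phone_book : List String), Dom_solution phone_book → Spec_solution phone_book (solution phone_book)

-- ===== LEMMAS AND PROOFS =====

-- A returns True iff no entry is a substring of a different-index entry
def Aprop (pb : List String) : Prop :=
  ∃ i j : Nat, i < pb.length ∧ j < pb.length ∧ i ≠ j ∧
    (pb.getD i "").toList <:+: (pb.getD j "").toList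

-- B returns True iff no entry q has a substring t present elsewhere in the book
def Bprop (pb : List String) : Prop :=
  ∃ q ∈ pb, ∃ t : String, t.toList <:+: q.toList ∧
    (pb.count t : Int) > (if t = q then 1 else 0)

-- ---- Python str.count: positivity is exactly the infix relation ----

theorem count_go_le (sub : List Char) (fuel : Nat) :
    ∀ (l : List Char) (acc : Nat), acc ≤ PySem.Chars.count.go sub fuel l acc := by
  induction fuel with
  | zero => intro l acc; cases l <;> simp [PySem.Chars.count.go]
  | succ n ih =>
    intro l acc
    cases l with
    | nil => simp [PySem.Chars.count.go]
    | cons h t =>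
      rw [PySem.Chars.count.go]
      split
      · exact le_trans (Nat.le_succ acc) (ih _ _)
      · exact ih _ _

theorem count_go_pos_iff (sub : List Char) (hsub : sub ≠ []) (fuel : Nat) :
    ∀ (l : List Char) (acc : Nat), l.length ≤ fuel →
      (acc < PySem.Chars.count.go sub fuel l acc ↔ sub <:+: l) := by
  induction fuel with
  | zero =>
    intro l acc hl
    have : l = [] := List.eq_nil_of_length_eq_zero (Nat.le_zero.mp hl)
    subst this
    simp [PySem.Chars.count.go, List.infix_nil, hsub]
  | succ n ih =>
    intro l acc hl
    cases l with
    | nil => simp [PySem.Chars.count.go, List.infix_nil, hsub]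
    | cons h t =>
      rw [PySem.Chars.count.go]
      rw [List.infix_cons_iff]
      split
      · rename_i hpre
        have hp : sub <+: h :: t := List.isPrefixOf_iff_prefix.mp hpre
        constructor
        · intro _; exact Or.inl hp
        · intro _
          calc acc < acc + 1 := Nat.lt_succ_self acc
            _ ≤ _ := count_go_le sub n _ _
      · rename_i hpre
        have hp : ¬ sub <+: h :: t := fun hc => hpre (List.isPrefixOf_iff_prefix.mpr hc)
        rw [ih t acc (by simpa using Nat.le_of_succ_le_succ (by simpa using hl))]
        simp [hp]

theorem chars_count_pos_iff (s sub : List Char) :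
    0 < PySem.Chars.count s sub ↔ sub <:+: s := by
  unfold PySem.Chars.count
  split
  · rename_i he
    simp_all [List.isEmpty_iff]
  · rename_i he
    exact count_go_pos_iff sub (by simpa [List.isEmpty_iff] using he) s.length s 0 le_rfl

-- ---- characterisation of A ----

theorem solnInner_eq (pb : List String) (i : Int) :
    ∀ (js : List Int) (ans : Bool),
      solnInner pb i ans js =
        (ans && !(js.any (fun j => !(i == j) &&
          decide (0 < PySem.Str.count (PySem.List.pyGetD pb j "") (PySem.List.pyGetD pb i ""))))) := by
  intro js
  induction js with
  | nil => intro ans; simp [solnInner]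
  | cons j js ih =>
    intro ans
    rw [solnInner]
    by_cases hij : i = j
    · subst hij
      rw [if_pos rfl, ih]
      simp
    · rw [if_neg hij]
      by_cases hc : 0 < PySem.Str.count (PySem.List.pyGetD pb j "") (PySem.List.pyGetD pb i "")
      · simp only [gt_iff_lt, if_pos hc]
        simp only [PySem.Str.count_eq] at hc
        simp [hij]
        intro _ h0
        omega
      · simp only [gt_iff_lt, if_neg hc]
        simp only [PySem.Str.count_eq] at hc
        cases ans
        · simp
        · simp [hij, ih]
          intro _
          omega

theorem foldl_and_not_any {α : Type} (f : α → Bool) :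
    ∀ (l : List α) (ans : Bool), l.foldl (fun a x => a && !f x) ans = (ans && !l.any f) := by
  intro l
  induction l with
  | nil => intro ans; simp
  | cons x l ih =>
    intro ans
    simp only [List.foldl_cons, List.any_cons, ih]
    cases ans <;> cases f x <;> simp

theorem mem_range_ab (a b : Int) (x : Int) :
    x ∈ PySem.List.pyRange a b 1 ↔ a ≤ x ∧ x < b := by
  rw [PySem.List.mem_pyRange_iff_of_pos one_pos]
  simp

theorem any_any_iff_aprop (pb : List String) :
    ((PySem.List.pyRange 0 pb.length 1).any (fun i => (PySem.List.pyRange 0 pb.length 1).any (fun j => !(i == j) &&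
          decide (0 < PySem.Str.count (PySem.List.pyGetD pb j "") (PySem.List.pyGetD pb i ""))))) = true
      ↔ Aprop pb := by
  simp only [List.any_eq_true, mem_range_ab, Bool.and_eq_true, Bool.not_eq_eq_eq_not,
    decide_eq_true_eq, PySem.Str.count_eq, chars_count_pos_iff]
  constructor
  · rintro ⟨i, ⟨hi0, hin⟩, j, ⟨hj0, hjn⟩, hne, hinf⟩
    have hi' : i = (i.toNat : Int) := by omega
    have hj' : j = (j.toNat : Int) := by omega
    rw [hi', hj'] at hne hinf
    rw [PySem.List.pyGetD_natCast, PySem.List.pyGetD_natCast] at hinf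
    refine ⟨i.toNat, j.toNat, by omega, by omega, ?_, hinf⟩
    intro h
    rw [h] at hne
    simp at hne
  · rintro ⟨i, j, hi, hj, hne, hinf⟩
    refine ⟨(i : Int), ⟨by omega, by omega⟩, (j : Int), ⟨by omega, by omega⟩, ?_, ?_⟩
    · simp [hne]
    · simpa [PySem.List.pyGetD_natCast] using hinf

theorem solution_eq_true_iff (pb : List String) :
    solution pb = true ↔ ¬ Aprop pb := by
  unfold solution
  have hbody : (fun (answer : Bool) (i : Int) => solnInner pb i answer (PySem.List.pyRange 0 pb.length 1))
      = (fun (answer : Bool) (i : Int) => answer && !((PySem.List.pyRange 0 pb.length 1).any (fun j => !(i == j) &&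
          decide (0 < PySem.Str.count (PySem.List.pyGetD pb j "") (PySem.List.pyGetD pb i ""))))) :=
    funext fun ans => funext fun i => solnInner_eq pb i _ ans
  rw [hbody, foldl_and_not_any]
  simp only [Bool.true_and, Bool.not_eq_true']
  rw [← any_any_iff_aprop pb]
  simp

-- ---- characterisation of B ----

theorem exists_slice_iff (q : String) (P : String → Prop) :
    (∃ a ∈ PySem.List.pyRange 0 (PySem.Str.len q + 1) 1,
      ∃ b ∈ PySem.List.pyRange a (PySem.Str.len q + 1) 1,
        P (PySem.Str.slice q (some a) (some b)))
      ↔ ∃ t : String, t.toList <:+: q.toList ∧ P t := by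
  constructor
  · rintro ⟨a, ha, b, hb, hP⟩
    rw [mem_range_ab] at ha hb
    refine ⟨PySem.Str.slice q (some a) (some b), ?_, hP⟩
    have ha' : a = (a.toNat : Int) := by omega
    have hb' : b = (b.toNat : Int) := by omega
    rw [PySem.Str.toList_slice, PySem.Chars.slice_eq_listSlice, ha', hb',
      PySem.List.slice_natCast]
    exact ((List.take_prefix _ _).isInfix).trans ((List.drop_suffix _ _).isInfix)
  · rintro ⟨t, hinf, hP⟩
    rcases hinf with ⟨s1, s2, hq⟩
    have hlen : s1.length + t.toList.length + s2.length = q.toList.length := by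
      rw [← hq]; simp; omega
    have hslice : PySem.Str.slice q (some (s1.length : Int))
        (some ((s1.length : Int) + (t.toList.length : Int))) = t := by
      apply String.toList_inj.mp
      rw [PySem.Str.toList_slice, PySem.Chars.slice_eq_listSlice,
        PySem.List.slice_natCast_add, ← hq]
      rw [List.append_assoc, List.drop_left, List.take_left]
    refine ⟨(s1.length : Int), ?_, (s1.length : Int) + (t.toList.length : Int), ?_, ?_⟩
    · rw [mem_range_ab, PySem.Str.len_eq]; omega
    · rw [mem_range_ab, PySem.Str.len_eq]; omega
    · rw [hslice]; exact hP

theorem getD_book (pb : List String) (t : String) :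
    (List.foldl (fun d p => d.insert p (d.getD p 0 + 1)) (PySem.Dict.empty : PySem.Dict String Int) pb).getD t 0 = (pb.count t : Int) := by
  rw [PySem.Dict.getD_foldl_insert_add_one]
  simp [PySem.Dict.empty, PySem.Dict.getD, PySem.Dict.get?]

theorem alt_eq_true_iff (pb : List String) :
    solution_alt pb = true ↔ ¬ Bprop pb := by
  have hPt : ∀ q t : String,
      ((List.foldl (fun d p => d.insert p (d.getD p 0 + 1)) (PySem.Dict.empty : PySem.Dict String Int) pb).getD t 0 > (if t == q then (1 : Int) else 0))
        ↔ ((pb.count t : Int) > if t = q then 1 else 0) := by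
    intro q t
    rw [getD_book]
    simp [beq_iff_eq]
  unfold solution_alt
  simp only [Bool.not_eq_true', List.any_eq_false, List.any_eq_true, decide_eq_true_eq]
  unfold Bprop
  constructor
  · rintro h ⟨q, hq, t, hinf, hcnt⟩
    refine h q hq ?_
    exact (exists_slice_iff q (fun t =>
      (List.foldl (fun d p => d.insert p (d.getD p 0 + 1)) (PySem.Dict.empty : PySem.Dict String Int) pb).getD t 0 > if (t == q) = true then (1 : Int) else 0)).mpr
        ⟨t, hinf, (hPt q t).mpr hcnt⟩
  · intro h q hq hex
    apply h
    obtain ⟨t, hinf, hP⟩ := (exists_slice_iff q (fun t =>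
      (List.foldl (fun d p => d.insert p (d.getD p 0 + 1)) (PySem.Dict.empty : PySem.Dict String Int) pb).getD t 0 > if (t == q) = true then (1 : Int) else 0)).mp hex
    exact ⟨q, hq, t, hinf, (hPt q t).mp hP⟩

-- ---- Aprop ↔ Bprop ----

-- two distinct indices holding t give multiplicity ≥ 2
theorem two_le_count (pb : List String) (t : String) (i j : Nat)
    (hi : i < pb.length) (hj : j < pb.length) (hij : i < j)
    (h1 : pb[i] = t) (h2 : pb[j] = t) : 2 ≤ pb.count t := by
  have hmem1 : t ∈ pb.take j :=
    List.mem_iff_getElem.mpr ⟨i, by simp; omega, by rw [List.getElem_take]; exact h1⟩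
  have hmem2 : t ∈ pb.drop j :=
    List.mem_iff_getElem.mpr ⟨0, by simp; omega, by rw [List.getElem_drop]; simpa using h2⟩
  calc 2 = 1 + 1 := rfl
    _ ≤ (pb.take j).count t + (pb.drop j).count t :=
        Nat.add_le_add (List.one_le_count_iff.mpr hmem1) (List.one_le_count_iff.mpr hmem2)
    _ = pb.count t := by rw [← List.count_append, List.take_append_drop]

-- multiplicity ≥ 2 and one index holding t give another index holding t
theorem exists_other_index (pb : List String) (t : String) (j : Nat)
    (hj : j < pb.length) (hjt : pb[j] = t) (h2 : 2 ≤ pb.count t) :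
    ∃ i, ∃ _ : i < pb.length, i ≠ j ∧ pb.getD i "" = t := by
  have hsplit : pb.count t = (pb.take j).count t + (pb[j] :: pb.drop (j + 1)).count t := by
    rw [← List.count_append]
    congr 1
    rw [List.getElem_cons_drop, List.take_append_drop]
  rw [List.count_cons, if_pos (by simp [hjt])] at hsplit
  have hone : 1 ≤ (pb.take j).count t + (pb.drop (j + 1)).count t := by omega
  rcases Nat.lt_or_ge 0 ((pb.take j).count t) with hc | hc
  · have hmem : t ∈ pb.take j := List.one_le_count_iff.mp hc
    obtain ⟨i, hlt, hit⟩ := List.getElem_of_mem hmem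
    have hij : i < j := by simp at hlt; omega
    have hin : i < pb.length := by omega
    refine ⟨i, hin, by omega, ?_⟩
    rw [List.getD_eq_getElem _ _ hin, ← hit, List.getElem_take]
  · have hmem : t ∈ pb.drop (j + 1) := List.one_le_count_iff.mp (by omega)
    obtain ⟨m, hlt, hmt⟩ := List.getElem_of_mem hmem
    have hmn : j + 1 + m < pb.length := by simp at hlt; omega
    refine ⟨j + 1 + m, hmn, by omega, ?_⟩
    rw [List.getD_eq_getElem _ _ hmn, ← hmt, List.getElem_drop]

theorem aprop_iff_bprop (pb : List String) : Aprop pb ↔ Bprop pb := by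
  constructor
  · rintro ⟨i, j, hi, hj, hne, hinf⟩
    rw [List.getD_eq_getElem _ _ hi, List.getD_eq_getElem _ _ hj] at hinf
    refine ⟨pb[j], List.getElem_mem hj, pb[i], hinf, ?_⟩
    by_cases heq : pb[i] = pb[j]
    · rw [if_pos heq]
      have h2 : 2 ≤ pb.count pb[i] := by
        rcases Nat.lt_or_ge i j with h | h
        · exact two_le_count pb pb[i] i j hi hj h rfl heq.symm
        · exact two_le_count pb pb[i] j i hj hi (by omega) heq.symm rfl
      omega
    · rw [if_neg heq]
      have h1 : 1 ≤ pb.count pb[i] := List.one_le_count_iff.mpr (List.getElem_mem hi)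
      omega
  · rintro ⟨q, hqmem, t, hinf, hcnt⟩
    obtain ⟨j, hj, hjq⟩ := List.getElem_of_mem hqmem
    by_cases heq : t = q
    · subst heq
      have h2 : 2 ≤ pb.count t := by
        rw [if_pos rfl] at hcnt
        omega
      obtain ⟨i, hin, hij, hit⟩ := exists_other_index pb t j hj hjq h2
      refine ⟨i, j, hin, hj, hij, ?_⟩
      rw [hit, List.getD_eq_getElem _ _ hj, hjq]
    · rw [if_neg heq] at hcnt
      have h1 : 1 ≤ pb.count t := by omega
      obtain ⟨i, hin, hit⟩ := List.getElem_of_mem (List.one_le_count_iff.mp h1)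
      refine ⟨i, j, hin, hj, ?_, ?_⟩
      · intro h
        subst h
        exact heq (by rw [← hit, hjq])
      · rw [List.getD_eq_getElem _ _ hin, List.getD_eq_getElem _ _ hj, hit, hjq]
        exact hinf

-- ===== VERDICT (by name: the statement is the Claim_ definition above) =====
theorem solution_spec : Claim_equal_solution := by
  intro pb _
  unfold Spec_solution
  rw [Bool.eq_iff_iff, solution_eq_true_iff, alt_eq_true_iff, aprop_iff_bprop]
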